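-- pv_equiv track=rewrite | github.com/edgaytanc/sistema-audita | auditoria/processors/excel/centralizadoras/fechas.py | preparar_fechas_excel
-- ===== SOURCE A (Python) =====
-- def preparar_fechas_excel(fechas_semestrales):
--     """
--     Prepara las fechas para mostrar en Excel
--
--     Args:
--         fechas_semestrales: Lista con todas las fechas semestrales
--
--     Returns:
--         Tuple con (fechas_año_viejo, fecha_mas_reciente, año_mas_viejo, año_mas_reciente, fechas_excel)
--     """
--     # Ordenar fechas por año
--     fechas_por_año = {}
--     for fecha in fechas_semestrales:
--         año = fecha.split('-')[0]
--         if año not in fechas_por_año: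
--             fechas_por_año[año] = []
--         fechas_por_año[año].append(fecha)
--
--     # Ordenar años
--     años_ordenados = sorted(fechas_por_año.keys())
--
--     if not años_ordenados:
--         return [], "", "", "", {}
--
--     # Obtener el año más viejo y el más reciente
--     año_mas_viejo = años_ordenados[0]
--     año_mas_reciente = años_ordenados[-1]
--
--     # Obtener las fechas del año más viejo (ordenadas)
--     fechas_año_viejo = sorted(fechas_por_año[año_mas_viejo])
--
--     # Verificar si tenemos suficientes fechas para el año más viejo
--     while len(fechas_año_viejo) < 3:
--         if fechas_año_viejo:
--             fechas_año_viejo.append(fechas_año_viejo[-1])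
--         else:
--             fechas_año_viejo.append("")
--
--     # Obtener la fecha más reciente del año más reciente
--     fecha_mas_reciente = sorted(fechas_por_año[año_mas_reciente])[-1]
--
--     # Formatear fechas para Excel
--     fechas_excel = {
--         'D12': f"Al 01/01/{año_mas_viejo}",
--         'E12': f"Al 31/07/{año_mas_viejo}",
--         'F12': f"Al 31/12/{año_mas_viejo}",
--         'I12': f"Al 31/12/{año_mas_reciente}"
--     }
--
--     return fechas_año_viejo, fecha_mas_reciente, año_mas_viejo, año_mas_reciente, fechas_excel
-- ===== SOURCE B (Python) =====
-- def preparar_fechas_excel(fechas_semestrales):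
--     if not fechas_semestrales:
--         return [], "", "", "", {}
--     años = [f.split('-')[0] for f in fechas_semestrales]
--     año_mas_viejo = min(años)
--     año_mas_reciente = max(años)
--     viejo = sorted(f for f in fechas_semestrales if f.split('-')[0] == año_mas_viejo)
--     fechas_año_viejo = viejo + [viejo[-1]] * (3 - len(viejo))
--     fecha_mas_reciente = max(f for f in fechas_semestrales if f.split('-')[0] == año_mas_reciente)
--     fechas_excel = {
--         'D12': f"Al 01/01/{año_mas_viejo}",
--         'E12': f"Al 31/07/{año_mas_viejo}",
--         'F12': f"Al 31/12/{año_mas_viejo}",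
--         'I12': f"Al 31/12/{año_mas_reciente}"
--     }
--     return fechas_año_viejo, fecha_mas_reciente, año_mas_viejo, año_mas_reciente, fechas_excel
-- ===== Notes on version B (the rewrite author's own statement) =====
-- stated objective: simpler
-- what changed: Drops the year-grouping dict and sorted key list entirely: B guards the empty case, takes min/max over the year prefixes directly, builds the oldest-year list by filter+sort with arithmetic padding instead of a while loop, and takes the newest date with max over a filter.
import Mathlib
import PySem

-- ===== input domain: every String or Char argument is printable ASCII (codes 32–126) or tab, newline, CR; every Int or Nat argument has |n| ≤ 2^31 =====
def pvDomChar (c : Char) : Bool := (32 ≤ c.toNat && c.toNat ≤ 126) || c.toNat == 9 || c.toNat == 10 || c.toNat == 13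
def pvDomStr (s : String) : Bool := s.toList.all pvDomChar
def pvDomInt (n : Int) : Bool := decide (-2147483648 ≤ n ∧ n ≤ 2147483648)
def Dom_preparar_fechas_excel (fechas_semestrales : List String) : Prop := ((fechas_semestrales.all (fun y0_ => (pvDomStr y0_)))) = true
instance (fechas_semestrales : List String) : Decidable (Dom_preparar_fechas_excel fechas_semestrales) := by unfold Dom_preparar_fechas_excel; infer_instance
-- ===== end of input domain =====

-- B drops A's year-grouping dict: it computes min/max year prefixes directly and
-- filters/sorts the date list, with arithmetic padding instead of A's while loop (objective: simpler).


-- ===== PORT A =====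
-- fecha.split('-')[0]  (split on a nonempty separator is never empty nor none, so [0] never raises)
def pvYear (f : String) : String := ((PySem.Str.split? f "-").getD []).headD ""

-- the while loop padding fechas_año_viejo up to length 3
def pvWhilePad (l : List String) : List String :=
  if l.length < 3 then
    pvWhilePad (l ++ [if l ≠ [] then l.getLastD "" else ""])
  else l
termination_by 3 - l.length
decreasing_by simp; omega

def preparar_fechas_excel (fechas_semestrales : List String) : List String × String × String × String × (List (String × String)) :=
  -- grouping loop: if año not in dict: dict[año] = []; dict[año].append(fecha)
  let fechas_por_año : PySem.Dict String (List String) :=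
    fechas_semestrales.foldl (fun d fecha =>
      let año := pvYear fecha
      let d := if d.contains año then d else d.insert año []
      d.insert año (d.getD año [] ++ [fecha])) PySem.Dict.empty
  let años_ordenados := PySem.List.sorted fechas_por_año.keys (fun x => x) false
  if años_ordenados = [] then ([], "", "", "", [])
  else
    let año_mas_viejo := años_ordenados.headD ""
    let año_mas_reciente := años_ordenados.getLastD ""
    let fechas_año_viejo := PySem.List.sorted (fechas_por_año.getD año_mas_viejo []) (fun x => x) false
    let fechas_año_viejo := pvWhilePad fechas_año_viejo
    let fecha_mas_reciente :=
      ((PySem.List.pyGet? (PySem.List.sorted (fechas_por_año.getD año_mas_reciente []) (fun x => x) false) (-1)).getD "")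
    (fechas_año_viejo, fecha_mas_reciente, año_mas_viejo, año_mas_reciente,
      [("D12", "Al 01/01/" ++ año_mas_viejo), ("E12", "Al 31/07/" ++ año_mas_viejo),
       ("F12", "Al 31/12/" ++ año_mas_viejo), ("I12", "Al 31/12/" ++ año_mas_reciente)])

-- ===== PORT B =====
def preparar_fechas_excel_alt (fechas_semestrales : List String) : List String × String × String × String × (List (String × String)) :=
  if fechas_semestrales = [] then ([], "", "", "", [])
  else
    let años := fechas_semestrales.map pvYear
    let año_mas_viejo := (PySem.List.min? años (fun x => x)).getD ""
    let año_mas_reciente := (PySem.List.max? años (fun x => x)).getD ""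
    let viejo := PySem.List.sorted (fechas_semestrales.filter (fun f => pvYear f == año_mas_viejo)) (fun x => x) false
    let fechas_año_viejo := viejo ++ List.replicate (3 - viejo.length) (viejo.getLastD "")
    let fecha_mas_reciente :=
      (PySem.List.max? (fechas_semestrales.filter (fun f => pvYear f == año_mas_reciente)) (fun x => x)).getD ""
    (fechas_año_viejo, fecha_mas_reciente, año_mas_viejo, año_mas_reciente,
      [("D12", "Al 01/01/" ++ año_mas_viejo), ("E12", "Al 31/07/" ++ año_mas_viejo),
       ("F12", "Al 31/12/" ++ año_mas_viejo), ("I12", "Al 31/12/" ++ año_mas_reciente)])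

-- ===== PRECONDITION & SPEC =====
def Spec_preparar_fechas_excel (fechas_semestrales : List String) (out : List String × String × String × String × (List (String × String))) : Prop := out = preparar_fechas_excel_alt fechas_semestrales
instance (fechas_semestrales : List String) (out : List String × String × String × String × (List (String × String))) : Decidable (Spec_preparar_fechas_excel fechas_semestrales out) := by unfold Spec_preparar_fechas_excel; infer_instance

-- ===== CLAIM (what is proved, stated in full; the proofs are below) =====
def Claim_equal_preparar_fechas_excel : Prop := ∀ (fechas_semestrales : List String), Dom_preparar_fechas_excel fechas_semestrales → Spec_preparar_fechas_excel fechas_semestrales (preparar_fechas_excel fechas_semestrales)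

-- ===== LEMMAS AND PROOFS =====

-- the padding while loop, in closed form (for a nonempty start)
lemma pvWhilePad_eq (l : List String) (h : l ≠ []) :
    pvWhilePad l = l ++ List.replicate (3 - l.length) (l.getLastD "") := by
  match l with
  | [a] =>
    rw [pvWhilePad]; simp
    rw [pvWhilePad]; simp
    rw [pvWhilePad]; simp
  | [a, b] =>
    rw [pvWhilePad]; simp
    rw [pvWhilePad]; simp
  | a :: b :: c :: t =>
    rw [pvWhilePad]; simp [Nat.not_lt.mpr]

-- one grouping step of A's loop is a dict.modify
lemma pvStep_eq (d : PySem.Dict String (List String)) (a : String) (f : String) :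
    (let d' := if d.contains a then d else d.insert a []
     d'.insert a (d'.getD a [] ++ [f])) = d.modify a [] (· ++ [f]) := by
  by_cases h : d.contains a
  · simp only [h, if_true]; rfl
  · have h' : d.contains a = false := by simpa using h
    simp only [h', Bool.false_eq_true, if_false, PySem.Dict.getD_insert_self,
      PySem.Dict.insert_insert_self, PySem.Dict.modify]
    rw [show d.getD a ([] : List String) = [] from PySem.Dict.getD_of_not_contains d _ h']

lemma pvGroupA_eq (l : List String) :
    l.foldl (fun d fecha =>
      let año := pvYear fecha
      let d := if d.contains año then d else d.insert año []
      d.insert año (d.getD año [] ++ [fecha])) PySem.Dict.empty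
    = l.foldl (fun d f => d.modify (pvYear f) [] (· ++ [f])) PySem.Dict.empty :=
  PySem.List.foldl_congr_mem l _ _ _ (fun acc x _ => pvStep_eq acc (pvYear x) x)

-- A's dict maps each year to the dates carrying that year, in input order
lemma pvGroup_getD (l : List String) (c : String) :
    (l.foldl (fun d f => d.modify (pvYear f) [] (· ++ [f])) PySem.Dict.empty).getD c []
    = l.filter (fun f => pvYear f == c) := by
  have h := PySem.Dict.getD_foldl_modify_append (l.map (fun f => (pvYear f, f)))
      (PySem.Dict.empty : PySem.Dict String (List String)) c
  rw [List.foldl_map] at h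
  simpa [List.filter_map, List.map_map, Function.comp_def] using h

-- A's dict keys are the distinct years in first-appearance order
lemma pvGroup_keys (l : List String) :
    (l.foldl (fun d f => d.modify (pvYear f) [] (· ++ [f])) PySem.Dict.empty).keys
    = PySem.Set.ofList (l.map pvYear) := by
  have h := PySem.Dict.keys_foldl_modify_key l pvYear ([] : List String)
      (fun _ f => (· ++ [f])) PySem.Dict.empty
  simpa [PySem.Set.ofList_eq_foldl, PySem.Set.update] using h

lemma pvPyGet_neg_one (l : List String) (h : l ≠ []) :
    PySem.List.pyGet? l (-1) = some (l.getLastD "") := by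
  have h1 : 1 ≤ l.length := List.length_pos_iff.mpr h
  simp [PySem.List.pyGet?, PySem.List.pyIdx?, h1, List.getLastD_eq_getLast?]
  rw [← List.getLast?_eq_getElem?]
  cases hl : l.getLast? with
  | none => exact absurd (List.getLast?_eq_none_iff.mp hl) h
  | some x => rfl

-- min/max over two lists with the same elements agree (as values)
lemma pvMin_getD_congr (xs ys : List String) (hx : xs ≠ [])
    (hmem : ∀ a, a ∈ xs ↔ a ∈ ys) :
    (PySem.List.min? xs (fun x => x)).getD "" = (PySem.List.min? ys (fun x => x)).getD "" := by
  have hy : ys ≠ [] := by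
    obtain ⟨a, ha⟩ := List.exists_mem_of_ne_nil xs hx
    exact List.ne_nil_of_mem ((hmem a).mp ha)
  cases hx' : PySem.List.min? xs (fun x => x) with
  | none => exact absurd ((PySem.List.min?_eq_none_iff xs _).mp hx') hx
  | some m =>
    cases hy' : PySem.List.min? ys (fun x => x) with
    | none => exact absurd ((PySem.List.min?_eq_none_iff ys _).mp hy') hy
    | some n =>
      simp only [Option.getD_some]
      exact le_antisymm
        (PySem.List.min?_isMin hx' n ((hmem n).mpr (PySem.List.min?_mem hy')))
        (PySem.List.min?_isMin hy' m ((hmem m).mp (PySem.List.min?_mem hx')))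

lemma pvMax_getD_congr (xs ys : List String) (hx : xs ≠ [])
    (hmem : ∀ a, a ∈ xs ↔ a ∈ ys) :
    (PySem.List.max? xs (fun x => x)).getD "" = (PySem.List.max? ys (fun x => x)).getD "" := by
  have hy : ys ≠ [] := by
    obtain ⟨a, ha⟩ := List.exists_mem_of_ne_nil xs hx
    exact List.ne_nil_of_mem ((hmem a).mp ha)
  cases hx' : PySem.List.max? xs (fun x => x) with
  | none => exact absurd ((PySem.List.max?_eq_none_iff xs _).mp hx') hx
  | some m =>
    cases hy' : PySem.List.max? ys (fun x => x) with
    | none => exact absurd ((PySem.List.max?_eq_none_iff ys _).mp hy') hy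
    | some n =>
      simp only [Option.getD_some]
      exact le_antisymm
        (PySem.List.max?_isMax hy' m ((hmem m).mp (PySem.List.max?_mem hx')))
        (PySem.List.max?_isMax hx' n ((hmem n).mpr (PySem.List.max?_mem hy')))

-- head of an ascending sort is the minimum value
lemma pvSorted_head_min (xs : List String) (h : xs ≠ []) :
    (PySem.List.sorted xs (fun x => x) false).headD "" = (PySem.List.min? xs (fun x => x)).getD "" := by
  have hs : PySem.List.sorted xs (fun x => x) false ≠ [] := by
    simpa [PySem.List.sorted_eq_nil_iff] using h
  have hperm := PySem.List.sorted_perm xs (fun x => x) false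
  have hpw := PySem.List.sorted_pairwise xs (fun x => x)
  cases hsl : PySem.List.sorted xs (fun x => x) false with
  | nil => exact absurd hsl hs
  | cons h0 t =>
    cases hm : PySem.List.min? xs (fun x => x) with
    | none => exact absurd ((PySem.List.min?_eq_none_iff xs _).mp hm) h
    | some m =>
      simp only [List.headD_cons, Option.getD_some]
      rw [hsl] at hperm hpw
      have hmem : m ∈ h0 :: t := hperm.mem_iff.mpr (PySem.List.min?_mem hm)
      have h0x : h0 ∈ xs := hperm.mem_iff.mp List.mem_cons_self
      refine le_antisymm ?_ (PySem.List.min?_isMin hm h0 h0x)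
      rcases List.mem_cons.mp hmem with rfl | hmt
      · exact le_rfl
      · exact (List.pairwise_cons.mp hpw).1 m hmt

-- last element of an ascending sort is the maximum value
lemma pvSorted_last_max (xs : List String) (h : xs ≠ []) :
    (PySem.List.sorted xs (fun x => x) false).getLastD "" = (PySem.List.max? xs (fun x => x)).getD "" := by
  have hs : PySem.List.sorted xs (fun x => x) false ≠ [] := by
    simpa [PySem.List.sorted_eq_nil_iff] using h
  have hperm := PySem.List.sorted_perm xs (fun x => x) false
  have hpw := fun p q h1 h2 => PySem.List.sorted_id_getElem_mono (xs := xs) (p := p) (q := q) h1 h2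
  cases hm : PySem.List.max? xs (fun x => x) with
  | none => exact absurd ((PySem.List.max?_eq_none_iff xs _).mp hm) h
  | some m =>
    simp only [Option.getD_some]
    have hlen : 0 < (PySem.List.sorted xs (fun x => x) false).length := List.length_pos_iff.mpr hs
    have hlast_eq : (PySem.List.sorted xs (fun x => x) false).getLastD ""
        = (PySem.List.sorted xs (fun x => x) false)[(PySem.List.sorted xs (fun x => x) false).length - 1] := by
      rw [List.getLastD_eq_getLast?, List.getLast?_eq_some_getLast hs, Option.getD_some, List.getLast_eq_getElem]
    have hmem : m ∈ PySem.List.sorted xs (fun x => x) false := hperm.mem_iff.mpr (PySem.List.max?_mem hm)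
    obtain ⟨i, hi, hieq⟩ := List.mem_iff_getElem.mp hmem
    have hlastmem : (PySem.List.sorted xs (fun x => x) false).getLastD "" ∈ xs := by
      rw [hlast_eq]; exact hperm.mem_iff.mp (List.getElem_mem _)
    refine le_antisymm (PySem.List.max?_isMax hm _ hlastmem) ?_
    rw [hlast_eq, ← hieq]
    exact hpw i _ (by omega) (by omega)

theorem pvMain (l : List String) : preparar_fechas_excel l = preparar_fechas_excel_alt l := by
  by_cases hl : l = []
  · subst hl; rfl
  · have hmap : l.map pvYear ≠ [] := by simpa using hl
    have hset : PySem.Set.ofList (l.map pvYear) ≠ [] := by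
      obtain ⟨a, ha⟩ := List.exists_mem_of_ne_nil _ hmap
      exact List.ne_nil_of_mem ((PySem.Set.mem_ofList _ a).mpr ha)
    have hsort : PySem.List.sorted (PySem.Set.ofList (l.map pvYear)) (fun x => x) false ≠ [] := by
      simpa [PySem.List.sorted_eq_nil_iff] using hset
    have hmemiff : ∀ a, a ∈ PySem.Set.ofList (l.map pvYear) ↔ a ∈ l.map pvYear :=
      PySem.Set.mem_ofList _
    have hmin : (PySem.List.sorted (PySem.Set.ofList (l.map pvYear)) (fun x => x) false).headD ""
        = (PySem.List.min? (l.map pvYear) (fun x => x)).getD "" :=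
      (pvSorted_head_min _ hset).trans (pvMin_getD_congr _ _ hset hmemiff)
    have hmax : (PySem.List.sorted (PySem.Set.ofList (l.map pvYear)) (fun x => x) false).getLastD ""
        = (PySem.List.max? (l.map pvYear) (fun x => x)).getD "" :=
      (pvSorted_last_max _ hset).trans (pvMax_getD_congr _ _ hset hmemiff)
    -- the min/max years occur among the years, so the filtered date lists are nonempty
    have hfil : ∀ y, y ∈ l.map pvYear → l.filter (fun f => pvYear f == y) ≠ [] := by
      intro y hy
      obtain ⟨f, hf, rfl⟩ := List.mem_map.mp hy
      intro hcon
      have : f ∈ l.filter (fun f' => pvYear f' == pvYear f) := by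
        simp [List.mem_filter, hf]
      simp [hcon] at this
    have hminmem : (PySem.List.min? (l.map pvYear) (fun x => x)).getD "" ∈ l.map pvYear := by
      cases hm : PySem.List.min? (l.map pvYear) (fun x => x) with
      | none => exact absurd ((PySem.List.min?_eq_none_iff _ _).mp hm) hmap
      | some m => simpa using PySem.List.min?_mem hm
    have hmaxmem : (PySem.List.max? (l.map pvYear) (fun x => x)).getD "" ∈ l.map pvYear := by
      cases hm : PySem.List.max? (l.map pvYear) (fun x => x) with
      | none => exact absurd ((PySem.List.max?_eq_none_iff _ _).mp hm) hmap
      | some m => simpa using PySem.List.max?_mem hm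
    have hsfilmin : PySem.List.sorted (l.filter (fun f => pvYear f == (PySem.List.min? (l.map pvYear) (fun x => x)).getD "")) (fun x => x) false ≠ [] := by
      simpa [PySem.List.sorted_eq_nil_iff] using hfil _ hminmem
    have hsfilmax : PySem.List.sorted (l.filter (fun f => pvYear f == (PySem.List.max? (l.map pvYear) (fun x => x)).getD "")) (fun x => x) false ≠ [] := by
      simpa [PySem.List.sorted_eq_nil_iff] using hfil _ hmaxmem
    simp only [preparar_fechas_excel, preparar_fechas_excel_alt, pvGroupA_eq, pvGroup_keys,
      pvGroup_getD, hl, if_false, if_neg hsort, hmin, hmax,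
      pvWhilePad_eq _ hsfilmin, pvPyGet_neg_one _ hsfilmax, Option.getD_some,
      pvSorted_last_max _ (hfil _ hmaxmem)]

-- ===== VERDICT (by name: the statement is the Claim_ definition above) =====
theorem preparar_fechas_excel_spec : Claim_equal_preparar_fechas_excel := by
  intro l _
  unfold Spec_preparar_fechas_excel
  exact pvMain l
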